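-- pv_equiv track=rewrite | github.com/ferruano99/DAA | Examenes/ejerciciosrandom.py | bt_socios_1sol
-- ===== SOURCE A (Python) =====
-- def factible_socios(cosas, sol, etapa, intento):
--     total_cosas = 0
--     for i in cosas:
--         total_cosas += i
--     mitades = total_cosas // 2
--     mi_socio = 0
--     for i in range(etapa):  # vemos el peso que tenemos
--         if sol[i] == intento:
--             mi_socio += cosas[i]
--     if (mi_socio + cosas[etapa]) > mitades:
--         return False
--     return True
--
-- def bt_socios_1sol(cosas, sol, etapa):
--     exito = False
--     intento = 1
--     while intento <= 2 and not exito: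
--         if factible_socios(cosas, sol, etapa, intento):
--             sol[etapa] = intento
--             if etapa == (len(sol) - 1):
--                 exito = True
--             else:
--                 exito = bt_socios_1sol(cosas, sol, etapa + 1)
--                 if not exito:
--                     sol[etapa] = 0
--         intento += 1
--     return exito
-- ===== SOURCE B (Python) =====
-- def bt_socios_1sol(cosas, sol, etapa):
--     # same in-place writes to sol as the original; return-value equivalence is what is claimed
--     mitades = sum(cosas) // 2
--     n = len(sol)
--     w1 = 0
--     w2 = 0
--     for i in range(etapa):
--         if sol[i] == 1:
--             w1 += cosas[i]
--         elif sol[i] == 2: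
--             w2 += cosas[i]
--
--     def search(k, w1, w2):
--         if k == n:
--             return True
--         x = cosas[k]
--         if w1 + x <= mitades:
--             sol[k] = 1
--             if search(k + 1, w1 + x, w2):
--                 return True
--             sol[k] = 0
--         if w2 + x <= mitades:
--             sol[k] = 2
--             if search(k + 1, w1, w2 + x):
--                 return True
--             sol[k] = 0
--         return False
--
--     return search(etapa, w1, w2)
-- ===== Notes on version B (the rewrite author's own statement) =====
-- stated objective: alternative
-- what changed: A recomputes the total sum and rescans the whole assignment prefix at every search node (factible_socios); B computes total//2 and the two partner weights once before the search and maintains both weights incrementally while backtracking (same worst-case exponential search, different per-node bookkeeping).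
-- outside the precondition, e.g. on bt_socios_1sol([1, 1], [0, 0], -1): A returns True, B returns False; on bt_socios_1sol([5, 9], [0], 1): A returns False, B returns True; on bt_socios_1sol([5], [0, 0], 0): A returns False, B returns False
import Mathlib
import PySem

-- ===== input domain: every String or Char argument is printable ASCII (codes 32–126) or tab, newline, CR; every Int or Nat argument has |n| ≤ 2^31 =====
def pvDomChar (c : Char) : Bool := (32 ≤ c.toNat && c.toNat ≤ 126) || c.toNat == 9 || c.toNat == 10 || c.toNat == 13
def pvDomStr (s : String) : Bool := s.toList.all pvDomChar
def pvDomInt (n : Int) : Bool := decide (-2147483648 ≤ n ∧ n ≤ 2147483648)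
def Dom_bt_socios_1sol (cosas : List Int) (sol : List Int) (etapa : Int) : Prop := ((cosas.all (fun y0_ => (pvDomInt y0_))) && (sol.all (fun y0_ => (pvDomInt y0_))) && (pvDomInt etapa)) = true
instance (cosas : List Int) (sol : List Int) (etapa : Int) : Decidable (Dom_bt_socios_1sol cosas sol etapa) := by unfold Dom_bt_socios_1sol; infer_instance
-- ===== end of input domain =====

-- B replaces A's per-node rescan (total sum + prefix scan in factible_socios) by computing
-- total//2 and the two partner weights once and maintaining them incrementally during the
-- backtracking. Both Pythons write the found assignment into `sol` in place in the same way;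
-- the equivalence proved here is about the RETURN value.

-- ===== PORT A =====
-- the 'for i in range(etapa): if sol[i] == intento: mi_socio += cosas[i]' loop of factible_socios;
-- indexing via pyGetD _ _ 0 is exact on Pre_ (all indices are in range there)
def pvMiSocio (cosas : List Int) (sol : List Int) (etapa : Int) (intento : Int) : Int :=
  (PySem.List.pyRange 0 etapa 1).foldl
    (fun acc i => if PySem.List.pyGetD sol i 0 == intento then acc + PySem.List.pyGetD cosas i 0 else acc) 0

def factible_socios (cosas : List Int) (sol : List Int) (etapa : Int) (intento : Int) : Bool :=
  let total_cosas := cosas.foldl (fun a i => a + i) 0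
  let mitades := PySem.Int.floordiv total_cosas 2
  let mi_socio := pvMiSocio cosas sol etapa intento
  if mi_socio + PySem.List.pyGetD cosas etapa 0 > mitades then false else true

-- the body of A's 'while intento <= 2' loop for one value of intento, returning (exito, sol);
-- in btA, fuel bounds the recursion depth (< sol.length + 1 under Pre_), it is never exhausted on Pre_
def btA_try (rec : List Int → Int → Bool × List Int) (cosas : List Int) (sol : List Int) (etapa : Int) (intento : Int) : Bool × List Int :=
  if factible_socios cosas sol etapa intento then
    let sol1 := PySem.List.pySetD sol etapa intento
    if etapa == (sol1.length : Int) - 1 then (true, sol1)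
    else
      let r := rec sol1 (etapa + 1)
      if r.1 then r else (false, PySem.List.pySetD r.2 etapa 0)
  else (false, sol)

def btA : Nat → List Int → List Int → Int → Bool × List Int
  | 0, _, sol, _ => (false, sol)
  | fuel+1, cosas, sol, etapa =>
    let r1 := btA_try (btA fuel cosas) cosas sol etapa 1
    if r1.1 then r1 else btA_try (btA fuel cosas) cosas r1.2 etapa 2

def bt_socios_1sol (cosas : List Int) (sol : List Int) (etapa : Int) : Bool :=
  (btA (sol.length + 1) cosas sol etapa).1

-- ===== PORT B =====
-- the initial 'for i in range(etapa)' loop of Source B computing (w1, w2)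
def btB_init (cosas : List Int) (sol : List Int) (etapa : Int) : Int × Int :=
  (PySem.List.pyRange 0 etapa 1).foldl
    (fun w i =>
      if PySem.List.pyGetD sol i 0 == 1 then (w.1 + PySem.List.pyGetD cosas i 0, w.2)
      else if PySem.List.pyGetD sol i 0 == 2 then (w.1, w.2 + PySem.List.pyGetD cosas i 0)
      else w) (0, 0)

-- Source B's `search`; its writes to sol do not affect the return value, which is all that is ported;
-- fuel bounds the recursion depth (never exhausted on Pre_)
def btB_search : Nat → List Int → Int → Int → Int → Int → Int → Bool
  | 0, _, _, _, _, _, _ => false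
  | fuel+1, cosas, mitades, n, k, w1, w2 =>
    if k == n then true
    else
      let x := PySem.List.pyGetD cosas k 0
      let ok1 := if w1 + x ≤ mitades then btB_search fuel cosas mitades n (k+1) (w1+x) w2 else false
      if ok1 then true
      else if w2 + x ≤ mitades then btB_search fuel cosas mitades n (k+1) w1 (w2+x) else false

def bt_socios_1sol_alt (cosas : List Int) (sol : List Int) (etapa : Int) : Bool :=
  let mitades := PySem.Int.floordiv cosas.sum 2
  let w := btB_init cosas sol etapa
  btB_search (sol.length + 1) cosas mitades (sol.length : Int) etapa w.1 w.2

-- ===== PRECONDITION & SPEC =====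
-- Pre_ restricts to the natural domain of the backtracking (0 <= etapa < len(sol) <= len(cosas)):
-- it excludes negative etapa (A's value there rests on Python's negative-index wraparound),
-- etapa >= len(sol) (A either raises IndexError at sol[etapa] or returns an accidental value from
-- the feasibility test alone), and cosas shorter than sol (A raises IndexError whenever the
-- search reaches an item index beyond cosas; on some such inputs it happens to fail earlier and
-- return False).
def Pre_bt_socios_1sol (cosas : List Int) (sol : List Int) (etapa : Int) : Prop :=
  0 ≤ etapa ∧ etapa < (sol.length : Int) ∧ sol.length ≤ cosas.length
instance (cosas : List Int) (sol : List Int) (etapa : Int) : Decidable (Pre_bt_socios_1sol cosas sol etapa) := by unfold Pre_bt_socios_1sol; infer_instance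

def pvWitness_bt_socios_1sol : List Int × List Int × Int := ([1, 1], [0, 0], 0)

def Spec_bt_socios_1sol (cosas : List Int) (sol : List Int) (etapa : Int) (out : Bool) : Prop := out = bt_socios_1sol_alt cosas sol etapa
instance (cosas : List Int) (sol : List Int) (etapa : Int) (out : Bool) : Decidable (Spec_bt_socios_1sol cosas sol etapa out) := by unfold Spec_bt_socios_1sol; infer_instance

-- ===== CLAIM (what is proved, stated in full; the proofs are below) =====
def Claim_equal_bt_socios_1sol : Prop := ∀ (cosas : List Int) (sol : List Int) (etapa : Int), Dom_bt_socios_1sol cosas sol etapa → Pre_bt_socios_1sol cosas sol etapa → Spec_bt_socios_1sol cosas sol etapa (bt_socios_1sol cosas sol etapa)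

-- ===== LEMMAS AND PROOFS =====

theorem init_aux (cosas sol : List Int) (l : List Int) (a b : Int) :
    l.foldl (fun w i =>
      if PySem.List.pyGetD sol i 0 == 1 then (w.1 + PySem.List.pyGetD cosas i 0, w.2)
      else if PySem.List.pyGetD sol i 0 == 2 then (w.1, w.2 + PySem.List.pyGetD cosas i 0)
      else w) (a, b)
    = (l.foldl (fun acc i => if PySem.List.pyGetD sol i 0 == 1 then acc + PySem.List.pyGetD cosas i 0 else acc) a,
       l.foldl (fun acc i => if PySem.List.pyGetD sol i 0 == 2 then acc + PySem.List.pyGetD cosas i 0 else acc) b) := by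
  induction l generalizing a b with
  | nil => rfl
  | cons x xs ih =>
    simp only [List.foldl_cons, beq_iff_eq] at ih ⊢
    by_cases h1 : PySem.List.pyGetD sol x 0 = 1
    · simp only [h1]
      norm_num
      exact ih _ _
    · by_cases h2 : PySem.List.pyGetD sol x 0 = 2
      · simp only [h2] at h1 ⊢
        norm_num [h1]
        exact ih _ _
      · simp only [if_neg h1, if_neg h2]
        exact ih _ _

theorem btB_init_eq (cosas sol : List Int) (etapa : Int) :
    btB_init cosas sol etapa = (pvMiSocio cosas sol etapa 1, pvMiSocio cosas sol etapa 2) := by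
  unfold btB_init pvMiSocio
  exact init_aux cosas sol _ 0 0

theorem pvMiSocio_congr (cosas : List Int) (s s' : List Int) (etapa intento : Int)
    (h : ∀ i : Int, 0 ≤ i → i < etapa → PySem.List.pyGetD s i 0 = PySem.List.pyGetD s' i 0) :
    pvMiSocio cosas s etapa intento = pvMiSocio cosas s' etapa intento := by
  unfold pvMiSocio
  apply PySem.List.foldl_congr_mem
  intro acc x hx
  rw [PySem.List.mem_pyRange_one] at hx
  rw [h x hx.1 hx.2]

theorem pyGetD_pySetD_nonneg (sol : List Int) (etapa v m d : Int)
    (h0 : 0 ≤ etapa) (h1 : etapa < (sol.length : Int)) (hm : 0 ≤ m) :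
    PySem.List.pyGetD (PySem.List.pySetD sol etapa v) m d
      = if m = etapa then v else PySem.List.pyGetD sol m d := by
  rw [PySem.List.pySetD_of_nonneg sol v h0, PySem.List.pyGetD_of_nonneg _ _ hm,
      PySem.List.pyGetD_of_nonneg _ _ hm]
  by_cases he : m = etapa
  · subst he
    simp [List.getD, show m.toNat < sol.length by omega]
  · have : etapa.toNat ≠ m.toNat := by omega
    simp [List.getD, List.getElem?_set_ne this, he]

theorem pvMiSocio_set (cosas sol : List Int) (etapa v intento : Int)
    (h0 : 0 ≤ etapa) (h1 : etapa < (sol.length : Int)) :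
    pvMiSocio cosas (PySem.List.pySetD sol etapa v) (etapa + 1) intento
      = pvMiSocio cosas sol etapa intento
        + (if v == intento then PySem.List.pyGetD cosas etapa 0 else 0) := by
  have step2 : pvMiSocio cosas (PySem.List.pySetD sol etapa v) etapa intento
      = pvMiSocio cosas sol etapa intento := by
    apply pvMiSocio_congr
    intro i hi0 hi
    rw [pyGetD_pySetD_nonneg sol etapa v i 0 h0 h1 hi0, if_neg (by omega)]
  unfold pvMiSocio at step2 ⊢
  rw [PySem.List.pyRange_one_succ_right (by omega), List.foldl_append, step2]
  simp only [List.foldl_cons, List.foldl_nil]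
  rw [pyGetD_pySetD_nonneg sol etapa v etapa 0 h0 h1 h0, if_pos rfl]
  by_cases hv : v = intento
  · simp [hv]
  · simp [hv]

theorem factible_eq (cosas sol : List Int) (etapa intento : Int) :
    factible_socios cosas sol etapa intento
      = decide (pvMiSocio cosas sol etapa intento + PySem.List.pyGetD cosas etapa 0
                  ≤ PySem.Int.floordiv cosas.sum 2) := by
  unfold factible_socios
  rw [← List.sum_eq_foldl]
  by_cases h : pvMiSocio cosas sol etapa intento + PySem.List.pyGetD cosas etapa 0
      > PySem.Int.floordiv cosas.sum 2
  · rw [if_pos h]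
    symm
    rw [decide_eq_false_iff_not]
    omega
  · rw [if_neg h]
    symm
    rw [decide_eq_true_iff]
    omega

theorem btA_main : ∀ (fuelA : Nat) (cosas sol : List Int) (etapa : Int) (fuelB : Nat),
    0 ≤ etapa → etapa < (sol.length : Int) → sol.length ≤ cosas.length →
    (sol.length : Int) - etapa ≤ (fuelA : Int) → (sol.length : Int) - etapa < (fuelB : Int) →
    (btA fuelA cosas sol etapa).1
        = btB_search fuelB cosas (PySem.Int.floordiv cosas.sum 2) (sol.length : Int) etapa
            (pvMiSocio cosas sol etapa 1) (pvMiSocio cosas sol etapa 2)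
      ∧ (btA fuelA cosas sol etapa).2.length = sol.length
      ∧ ∀ i : Int, 0 ≤ i → i < etapa →
          PySem.List.pyGetD (btA fuelA cosas sol etapa).2 i 0 = PySem.List.pyGetD sol i 0 := by
  intro fuelA
  induction fuelA with
  | zero =>
    intro cosas sol etapa fuelB h0 h1 h2 hfA hfB
    exact absurd hfA (by push_cast; omega)
  | succ fuelA ih =>
    intro cosas sol etapa fuelB h0 h1 h2 hfA hfB
    obtain ⟨fb, rfl⟩ : ∃ fb, fuelB = fb + 1 := ⟨fuelB - 1, by omega⟩
    set n : Int := (sol.length : Int) with hn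
    set mit : Int := PySem.Int.floordiv cosas.sum 2 with hmit
    set x : Int := PySem.List.pyGetD cosas etapa 0 with hx
    set w1 : Int := pvMiSocio cosas sol etapa 1 with hw1
    set w2 : Int := pvMiSocio cosas sol etapa 2 with hw2
    have hkn : (etapa == n) = false := by simp; omega
    -- RHS one step
    have hRHS : btB_search (fb+1) cosas mit n etapa w1 w2
        = (if (if w1 + x ≤ mit then btB_search fb cosas mit n (etapa+1) (w1+x) w2 else false)
            then true
            else if w2 + x ≤ mit then btB_search fb cosas mit n (etapa+1) w1 (w2+x) else false) := by
      simp only [btB_search, hkn]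
      rfl
    rw [hRHS]
    -- generic facts
    have hfac : ∀ (s' : List Int) (intento : Int),
        (∀ i : Int, 0 ≤ i → i < etapa → PySem.List.pyGetD s' i 0 = PySem.List.pyGetD sol i 0) →
        factible_socios cosas s' etapa intento
          = decide (pvMiSocio cosas sol etapa intento + x ≤ mit) := by
      intro s' intento hpfx
      rw [factible_eq, pvMiSocio_congr cosas s' sol etapa intento hpfx]
    have hw_set : ∀ (s' : List Int) (v intento : Int),
        s'.length = sol.length →
        (∀ i : Int, 0 ≤ i → i < etapa → PySem.List.pyGetD s' i 0 = PySem.List.pyGetD sol i 0) →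
        pvMiSocio cosas (PySem.List.pySetD s' etapa v) (etapa+1) intento
          = pvMiSocio cosas sol etapa intento + (if v == intento then x else 0) := by
      intro s' v intento hlen hpfx
      rw [pvMiSocio_set cosas s' etapa v intento h0 (by rw [hlen]; exact h1)]
      rw [pvMiSocio_congr cosas s' sol etapa intento hpfx]
    have hpfx_set : ∀ (s' : List Int) (v : Int), s'.length = sol.length →
        ∀ i : Int, 0 ≤ i → i < etapa →
          PySem.List.pyGetD (PySem.List.pySetD s' etapa v) i 0 = PySem.List.pyGetD s' i 0 := by
      intro s' v hlen i hi0 hi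
      rw [pyGetD_pySetD_nonneg s' etapa v i 0 h0 (by rw [hlen]; exact h1) hi0, if_neg (by omega)]
    -- evaluate one btA_try call on any list agreeing with sol below etapa
    have tryK : ∀ (s' : List Int) (intento : Int), s'.length = sol.length →
        (∀ i : Int, 0 ≤ i → i < etapa → PySem.List.pyGetD s' i 0 = PySem.List.pyGetD sol i 0) →
        ((btA_try (btA fuelA cosas) cosas s' etapa intento).1
            = (if pvMiSocio cosas sol etapa intento + x ≤ mit
               then btB_search fb cosas mit n (etapa+1)
                      (w1 + (if intento == 1 then x else 0)) (w2 + (if intento == 2 then x else 0))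
               else false))
          ∧ (btA_try (btA fuelA cosas) cosas s' etapa intento).2.length = sol.length
          ∧ ∀ i : Int, 0 ≤ i → i < etapa →
              PySem.List.pyGetD (btA_try (btA fuelA cosas) cosas s' etapa intento).2 i 0
                = PySem.List.pyGetD sol i 0 := by
      intro s' intento hlen hpfx
      unfold btA_try
      rw [hfac s' intento hpfx]
      by_cases c : pvMiSocio cosas sol etapa intento + x ≤ mit
      · rw [decide_eq_true c]
        simp only [eq_self_iff_true, if_true]
        rw [PySem.List.length_pySetD, hlen, ← hn]
        by_cases e : etapa = n - 1
        · have hcond : (etapa == n - 1) = true := by simp [e]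
          rw [if_pos hcond]
          obtain ⟨fb', rfl⟩ : ∃ fb', fb = fb' + 1 := ⟨fb - 1, by omega⟩
          have hB : ∀ u v : Int, btB_search (fb'+1) cosas mit n (etapa+1) u v = true := by
            intro u v
            have hk : (etapa + 1 == n) = true := by simp; omega
            simp only [btB_search, hk, if_true]
          refine ⟨?_, ?_, ?_⟩
          · simp only [hB]
            rw [if_pos c]
          · rw [PySem.List.length_pySetD, hlen]
          · intro i hi0 hi
            rw [hpfx_set s' intento hlen i hi0 hi, hpfx i hi0 hi]
        · have hcond : ¬ ((etapa == n - 1) = true) := by simp [e]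
          rw [if_neg hcond]
          have hlen1 : (PySem.List.pySetD s' etapa intento).length = sol.length := by
            rw [PySem.List.length_pySetD, hlen]
          have ihr := ih cosas (PySem.List.pySetD s' etapa intento) (etapa+1) fb
            (by omega)
            (by rw [hlen1, ← hn]; omega)
            (by rw [hlen1]; exact h2)
            (by rw [hlen1, ← hn]; push_cast at hfA ⊢; omega)
            (by rw [hlen1, ← hn]; push_cast at hfB ⊢; omega)
          rw [hw_set s' intento 1 hlen hpfx, hw_set s' intento 2 hlen hpfx] at ihr
          rw [show ((PySem.List.pySetD s' etapa intento).length : Int) = n by rw [hlen1, hn]] at ihr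
          have hpre : ∀ i : Int, 0 ≤ i → i < etapa →
              PySem.List.pyGetD (btA fuelA cosas (PySem.List.pySetD s' etapa intento) (etapa+1)).2 i 0
                = PySem.List.pyGetD sol i 0 := by
            intro i hi0 hi
            rw [ihr.2.2 i hi0 (by omega), hpfx_set s' intento hlen i hi0 hi, hpfx i hi0 hi]
          refine ⟨?_, ?_, ?_⟩
          · have hsel : (if (btA fuelA cosas (PySem.List.pySetD s' etapa intento) (etapa+1)).1
                then btA fuelA cosas (PySem.List.pySetD s' etapa intento) (etapa+1)
                else (false, PySem.List.pySetD (btA fuelA cosas (PySem.List.pySetD s' etapa intento) (etapa+1)).2 etapa 0)).1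
                = (btA fuelA cosas (PySem.List.pySetD s' etapa intento) (etapa+1)).1 := by
              by_cases hr : (btA fuelA cosas (PySem.List.pySetD s' etapa intento) (etapa+1)).1 = true <;> simp [hr]
            rw [hsel, ihr.1, if_pos c]
          · by_cases hr : (btA fuelA cosas (PySem.List.pySetD s' etapa intento) (etapa+1)).1 = true
            · rw [if_pos hr]
              rw [ihr.2.1, hlen1]
            · rw [if_neg hr]
              simp only
              rw [PySem.List.length_pySetD, ihr.2.1, hlen1]
          · intro i hi0 hi
            by_cases hr : (btA fuelA cosas (PySem.List.pySetD s' etapa intento) (etapa+1)).1 = true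
            · rw [if_pos hr]
              exact hpre i hi0 hi
            · rw [if_neg hr]
              simp only
              rw [pyGetD_pySetD_nonneg _ etapa 0 i 0 h0 (by rw [ihr.2.1, hlen1, ← hn]; exact h1) hi0,
                  if_neg (by omega), hpre i hi0 hi]
      · rw [if_neg c, decide_eq_false c]
        refine ⟨by simp, ?_, ?_⟩
        · simpa using hlen
        · intro i hi0 hi
          simpa using hpfx i hi0 hi
    -- assemble the two intento attempts
    rcases tryK sol 1 rfl (fun _ _ _ => rfl) with ⟨t1a, t1b, t1c⟩
    simp only [show ((1:Int) == 1) = true from by decide, show ((1:Int) == 2) = false from by decide,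
      eq_self_iff_true, Bool.false_eq_true, if_true, if_false, add_zero] at t1a
    simp only [← hw1, ← hw2] at t1a
    have hstep : btA (fuelA+1) cosas sol etapa
        = if (btA_try (btA fuelA cosas) cosas sol etapa 1).1
          then btA_try (btA fuelA cosas) cosas sol etapa 1
          else btA_try (btA fuelA cosas) cosas (btA_try (btA fuelA cosas) cosas sol etapa 1).2 etapa 2 := rfl
    by_cases hb : (btA_try (btA fuelA cosas) cosas sol etapa 1).1 = true
    · rw [hstep, if_pos hb]
      refine ⟨?_, t1b, t1c⟩
      rw [← t1a, hb, if_pos rfl]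
    · rw [hstep, if_neg hb]
      have hbf : (btA_try (btA fuelA cosas) cosas sol etapa 1).1 = false := by
        simpa using hb
      rcases tryK (btA_try (btA fuelA cosas) cosas sol etapa 1).2 2 t1b t1c with ⟨t2a, t2b, t2c⟩
      simp only [show ((2:Int) == 1) = false from by decide, show ((2:Int) == 2) = true from by decide,
        eq_self_iff_true, Bool.false_eq_true, if_true, if_false, add_zero] at t2a
      simp only [← hw1, ← hw2] at t2a
      refine ⟨?_, t2b, t2c⟩
      rw [t2a, ← t1a, hbf]
      simp

-- ===== VERDICT (by name: the statement is the Claim_ definition above) =====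
theorem bt_socios_1sol_spec : Claim_equal_bt_socios_1sol := by
  intro cosas sol etapa _ hpre
  obtain ⟨h0, h1, h2⟩ := hpre
  unfold Spec_bt_socios_1sol bt_socios_1sol bt_socios_1sol_alt
  rw [btB_init_eq]
  exact (btA_main (sol.length + 1) cosas sol etapa (sol.length + 1) h0 h1 h2
    (by push_cast; omega) (by push_cast; omega)).1
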